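-- pv_equiv track=rewrite | github.com/zhafed/richie | tests/apps/search/test_query_courses.py | get_expected_courses
-- ===== SOURCE A (Python) =====
-- def get_expected_courses(courses_definition, course_run_ids):
--     """
--     Compute the expected course ids from the course run ids.
--     """
--     # Remove courses that don't have archived course runs
--     # > [[3, ["H", "D"]], [2, ["G", "E"]]]
--     filtered_courses = list(
--         filter(
--             lambda o: any([id in course_run_ids for id in o[1]]), courses_definition
--         )
--     )
--
--     # Sort our courses according to the ranking of their open course runs:
--     # > [[2, ["G", "E"]], [3, ["H", "D"]]]
--     # Note that we only consider open course runs to sort our courses otherwise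
--     # some better course runs could make it incoherent. In our example, the "C"
--     # course run, if taken into account, would have lead to the following sequence
--     # which is not what we expect:
--     #   [[2, ["H", "D"]], [3, ["G", "E"]]]
--     sorted_courses = sorted(
--         filtered_courses,
--         key=lambda o: min(
--             [course_run_ids.index(id) for id in o[1] if id in course_run_ids]
--         ),
--     )
--
--     # Extract the expected list of courses
--     # > [1, 3, 0]
--     return list(list(zip(*sorted_courses))[0])
-- ===== SOURCE B (Python) =====
-- def get_expected_courses(courses_definition, course_run_ids):
--     """
--     Compute the expected course ids from the course run ids.
--
--     Single forward scan over course run ids: a course is emitted at the first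
--     position whose run id it contains (no run id of it occurs earlier), which
--     is exactly increasing order of the minimal matching index; ties keep the
--     original definition order, so no sort is needed.
--     """
--     result = []
--     for position, run_id in enumerate(course_run_ids):
--         earlier = course_run_ids[:position]
--         for course_id, run_ids in courses_definition:
--             if run_id in run_ids and not any(i in earlier for i in run_ids):
--                 result.append(course_id)
--     return result
-- ===== Notes on version B (the rewrite author's own statement) =====
-- stated objective: alternative
-- what changed: B replaces filter + stable sort by min course-run index + zip-extraction with a single forward scan over course_run_ids that emits a course's id at the first position whose run id it contains (no run id of the course occurring earlier), which yields the min-index order directly without sorting.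
import Mathlib
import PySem

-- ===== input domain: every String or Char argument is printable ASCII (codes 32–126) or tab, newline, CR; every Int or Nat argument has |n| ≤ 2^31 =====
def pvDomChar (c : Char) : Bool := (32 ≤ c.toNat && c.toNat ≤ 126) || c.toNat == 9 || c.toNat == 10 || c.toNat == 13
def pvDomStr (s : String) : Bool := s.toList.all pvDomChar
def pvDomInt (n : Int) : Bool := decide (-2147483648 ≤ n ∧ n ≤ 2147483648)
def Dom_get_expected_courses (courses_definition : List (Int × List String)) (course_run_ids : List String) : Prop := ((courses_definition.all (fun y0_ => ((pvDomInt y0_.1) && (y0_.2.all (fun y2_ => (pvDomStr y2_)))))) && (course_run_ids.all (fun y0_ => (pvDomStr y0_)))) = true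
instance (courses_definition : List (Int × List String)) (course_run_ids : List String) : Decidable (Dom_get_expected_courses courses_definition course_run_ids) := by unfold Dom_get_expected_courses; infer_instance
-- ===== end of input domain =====

-- B replaces filter + sort-by-min-index + extract with a single forward scan over the run ids
-- that emits each course at the first position matching it (objective: alternative decomposition, no sort).

-- ===== PORT A =====
-- any([id in course_run_ids for id in o[1]])
def pyAnyMatch (course_run_ids : List String) (o : Int × List String) : Bool :=
  (o.2.map (fun id => course_run_ids.contains id)).any (fun b => b)

-- key = min([course_run_ids.index(id) for id in o[1] if id in course_run_ids]).
-- Python's `min` raises on an empty list and `.index` on a missing value; both are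
-- unreachable here (the key is only applied to courses that passed the filter, and the
-- comprehension keeps only ids present in course_run_ids); `.getD 0` marks those
-- unreachable spots, everything else is exact.
def pyKey (course_run_ids : List String) (o : Int × List String) : Int :=
  ((PySem.List.min?
      ((o.2.filter (fun id => course_run_ids.contains id)).map
        (fun id => (((PySem.List.index? course_run_ids id).getD 0 : Nat) : Int)))
      (fun x => x)).getD 0)

def get_expected_courses (courses_definition : List (Int × List String)) (course_run_ids : List String) : List Int :=
  let filtered_courses := courses_definition.filter (fun o => pyAnyMatch course_run_ids o)
  let sorted_courses := PySem.List.sorted filtered_courses (pyKey course_run_ids) false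
  -- list(list(zip(*sorted_courses))[0]) = the first components; raises IndexError when
  -- sorted_courses is empty — exactly the inputs Pre_ excludes.
  sorted_courses.map (fun o => o.1)

-- ===== PORT B =====
def get_expected_courses_alt (courses_definition : List (Int × List String)) (course_run_ids : List String) : List Int :=
  (PySem.List.enumerate course_run_ids).foldl (fun result pr =>
    let earlier := PySem.List.slice course_run_ids none (some pr.1)
    courses_definition.foldl (fun result o =>
      if o.2.contains pr.2 && !(o.2.any (fun i => earlier.contains i))
      then result ++ [o.1] else result) result) []

-- ===== PRECONDITION & SPEC =====
-- Pre_ excludes exactly the inputs where no course has a run id among course_run_ids: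
-- there A's final `list(zip(*sorted_courses))[0]` raises IndexError (no value is returned).
def Pre_get_expected_courses (courses_definition : List (Int × List String)) (course_run_ids : List String) : Prop :=
  courses_definition.any (fun o => o.2.any (fun id => course_run_ids.contains id)) = true
instance (courses_definition : List (Int × List String)) (course_run_ids : List String) : Decidable (Pre_get_expected_courses courses_definition course_run_ids) := by unfold Pre_get_expected_courses; infer_instance
def pvWitness_get_expected_courses : (List (Int × List String)) × List String := ([(1, ["A"]), (2, ["B"])], ["B", "A"])

def Spec_get_expected_courses (courses_definition : List (Int × List String)) (course_run_ids : List String) (out : List Int) : Prop := out = get_expected_courses_alt courses_definition course_run_ids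
instance (courses_definition : List (Int × List String)) (course_run_ids : List String) (out : List Int) : Decidable (Spec_get_expected_courses courses_definition course_run_ids out) := by unfold Spec_get_expected_courses; infer_instance

-- ===== CLAIM (what is proved, stated in full; the proofs are below) =====
def Claim_equal_get_expected_courses : Prop := ∀ (courses_definition : List (Int × List String)) (course_run_ids : List String), Dom_get_expected_courses courses_definition course_run_ids → Pre_get_expected_courses courses_definition course_run_ids → Spec_get_expected_courses courses_definition course_run_ids (get_expected_courses courses_definition course_run_ids)


-- ===== LEMMAS AND PROOFS =====

-- membership in a prefix ↔ first-occurrence index below the cut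
theorem pv_mem_take_iff_index_lt {l : List String} {a : String} {p : Nat} :
    a ∈ l.take p ↔ ∃ q, PySem.List.index? l a = some q ∧ q < p := by
  induction l generalizing p with
  | nil => simp [PySem.List.index?]
  | cons x t ih =>
    cases p with
    | zero => simp
    | succ p =>
      by_cases hx : x = a
      · subst hx
        simp only [List.take_succ_cons, List.mem_cons, true_or, true_iff]
        exact ⟨0, PySem.List.index?_cons_self x t, Nat.succ_pos p⟩
      · rw [PySem.List.index?_cons_of_ne t hx]
        simp only [List.take_succ_cons, List.mem_cons, Ne.symm hx, false_or, ih]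
        constructor
        · rintro ⟨q, hq, hlt⟩
          exact ⟨q + 1, by
            rw [PySem.List.index?_eq_idxOf?] at hq
            simp [hq], by omega⟩
        · rintro ⟨q, hq, hlt⟩
          rcases Option.map_eq_some_iff.mp hq with ⟨q', hq', rfl⟩
          exact ⟨q', hq', by omega⟩

-- insertBy passes over a tail every element of which compares `before`
theorem pv_insertBy_append_of_before {α : Type} (before : α → α → Bool) (x : α)
    (u v : List α) (h : ∀ a ∈ v, before x a = true) :
    PySem.List.insertBy before x (u ++ v) = PySem.List.insertBy before x u ++ v := by
  induction u with
  | nil =>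
    cases v with
    | nil => rfl
    | cons a v' => simp [PySem.List.insertBy, h a (by simp)]
  | cons y u' ih =>
    simp only [List.cons_append, PySem.List.insertBy]
    split
    · rfl
    · rw [ih, List.cons_append]

theorem pv_sorted_append_singleton {α : Type} (l : List α) (x : α) (key : α → Int) :
    PySem.List.sorted (l ++ [x]) key false =
      PySem.List.insertBy (fun a b => decide (key a < key b)) x (PySem.List.sorted l key false) := by
  rw [PySem.List.sorted_eq_foldl_insertBy, PySem.List.sorted_eq_foldl_insertBy, List.foldl_append]
  rfl

-- stability: the maximal-key elements end up at the back, in original order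
theorem pv_sorted_split {α : Type} (key : α → Int) (t : Int) :
    ∀ l : List α, (∀ a ∈ l, key a ≤ t) →
    PySem.List.sorted l key false =
      PySem.List.sorted (l.filter (fun a => decide (key a < t))) key false ++
        l.filter (fun a => key a == t) := by
  intro l
  induction l using List.reverseRecOn with
  | nil => intro _; simp
  | append_singleton l x ih =>
    intro h
    have hl : ∀ a ∈ l, key a ≤ t := fun a ha => h a (by simp [ha])
    have hx : key x ≤ t := h x (by simp)
    rw [pv_sorted_append_singleton, ih hl]
    by_cases hlt : key x < t
    · rw [pv_insertBy_append_of_before _ _ _ _ (fun a ha => ?_), ← pv_sorted_append_singleton]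
      · simp only [List.filter_append, List.filter_cons, List.filter_nil]
        rw [decide_eq_true hlt]
        have : (key x == t) = false := by simp; omega
        rw [this]
        simp
      · have := (List.mem_filter.mp ha).2
        simp only [beq_iff_eq] at this
        simp [this, hlt]
    · have hxe : key x = t := le_antisymm hx (not_lt.mp hlt)
      rw [PySem.List.insertBy_of_forall_not_before _ _ _ (fun y hy => ?_)]
      · simp only [List.filter_append, List.filter_cons, List.filter_nil]
        rw [decide_eq_false hlt]
        have : (key x == t) = true := by simp [hxe]
        rw [this]
        simp
      · rcases List.mem_append.mp hy with hy | hy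
        · have := (List.mem_filter.mp ((PySem.List.mem_sorted _ _ _ _).mp hy)).2
          simp only [decide_eq_true_eq] at this
          simp; omega
        · have := (List.mem_filter.mp hy).2
          simp only [beq_iff_eq] at this
          simp; omega

-- a stable sort with keys in [0, n) is the concatenation of its tie groups
theorem pv_sorted_groups (key : (Int × List String) → Int) :
    ∀ (n : Nat) (l : List (Int × List String)),
    (∀ a ∈ l, 0 ≤ key a ∧ key a < (n : Int)) →
    PySem.List.sorted l key false =
      (List.range n).flatMap (fun (p : Nat) => l.filter (fun a => key a == (p : Int))) := by
  intro n
  induction n with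
  | zero =>
    intro l h
    have : l = [] := List.eq_nil_iff_forall_not_mem.mpr (fun a ha => by
      have := h a ha; omega)
    subst this
    rfl
  | succ n ih =>
    intro l h
    have hle : ∀ a ∈ l, key a ≤ (n : Int) := fun a ha => by
      have := (h a ha).2; push_cast at this ⊢; omega
    rw [pv_sorted_split key (n : Int) l hle,
        ih (l.filter (fun a => decide (key a < (n : Int)))) (fun a ha => by
          have h1 := (h a (List.mem_of_mem_filter ha)).1
          have h2 := (List.mem_filter.mp ha).2
          simp only [decide_eq_true_eq] at h2
          exact ⟨h1, h2⟩),
        List.range_succ, List.flatMap_append]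
    congr 1
    · refine List.flatMap_congr (fun p hp => ?_)
      rw [List.filter_filter]
      refine List.filter_congr (fun a _ => ?_)
      by_cases hap : key a = (p : Int)
      · have hpn : p < n := List.mem_range.mp hp
        simp only [hap, beq_self_eq_true, Bool.true_and, decide_eq_true_eq]
        exact_mod_cast hpn
      · simp [hap]
    · simp

-- the two per-position predicates agree
-- the list the key's comprehension builds
theorem pv_mem_keylist {rs : List String} {o : Int × List String} {m : Int} :
    m ∈ (o.2.filter (fun id => rs.contains id)).map
        (fun id => (((PySem.List.index? rs id).getD 0 : Nat) : Int)) ↔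
      ∃ id ∈ o.2, ∃ q, PySem.List.index? rs id = some q ∧ m = (q : Int) := by
  simp only [List.mem_map, List.mem_filter]
  constructor
  · rintro ⟨id, ⟨hid, hc⟩, rfl⟩
    have hs : (PySem.List.index? rs id).isSome = true :=
      (PySem.List.index?_isSome_iff rs id).mpr (by simpa using hc)
    rcases Option.isSome_iff_exists.mp hs with ⟨q, hq⟩
    exact ⟨id, hid, q, hq, by rw [hq]; rfl⟩
  · rintro ⟨id, hid, q, hq, rfl⟩
    have hmem : id ∈ rs := (PySem.List.index?_isSome_iff rs id).mp (by rw [hq]; rfl)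
    exact ⟨id, ⟨hid, by simpa using hmem⟩, by rw [hq]; rfl⟩

theorem pv_keylist_ne_nil {rs : List String} {o : Int × List String} (h : pyAnyMatch rs o = true) :
    (o.2.filter (fun id => rs.contains id)).map
      (fun id => (((PySem.List.index? rs id).getD 0 : Nat) : Int)) ≠ [] := by
  simp only [pyAnyMatch, List.any_map, List.any_eq_true] at h
  rcases h with ⟨id, hid, hc⟩
  simp only [ne_eq, List.map_eq_nil_iff, List.filter_eq_nil_iff]
  intro hall
  exact hall id hid (by simpa using hc)

theorem pv_key_eq_iff (rs : List String) (o : Int × List String) {p : Nat} (hp : p < rs.length) :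
    (pyAnyMatch rs o = true ∧ pyKey rs o = (p : Int)) ↔
      (rs[p] ∈ o.2 ∧ ∀ i ∈ o.2, i ∉ rs.take p) := by
  constructor
  · rintro ⟨ha, hk⟩
    unfold pyKey at hk
    cases hmin : PySem.List.min?
        ((o.2.filter (fun id => rs.contains id)).map
          (fun id => (((PySem.List.index? rs id).getD 0 : Nat) : Int))) (fun x => x) with
    | none => exact absurd ((PySem.List.min?_eq_none_iff _ _).mp hmin) (pv_keylist_ne_nil ha)
    | some m =>
      rw [hmin, Option.getD_some] at hk
      subst hk
      have hm := PySem.List.min?_mem hmin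
      rcases pv_mem_keylist.mp hm with ⟨id, hid, q, hq, hqm⟩
      have hqp : q = p := by exact_mod_cast hqm.symm
      subst hqp
      rcases PySem.List.getElem_of_index?_eq_some hq with ⟨hqlt, hrs, _⟩
      refine ⟨hrs ▸ hid, fun i hi hitake => ?_⟩
      rcases pv_mem_take_iff_index_lt.mp hitake with ⟨q', hq', hlt⟩
      have hmin_le := PySem.List.min?_isMin hmin ((q' : Int))
        (pv_mem_keylist.mpr ⟨i, hi, q', hq', rfl⟩)
      simp only at hmin_le
      omega
  · rintro ⟨hmem, hnone⟩
    have hprs : rs[p] ∈ rs := List.getElem_mem hp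
    have ha : pyAnyMatch rs o = true := by
      simp only [pyAnyMatch, List.any_map, List.any_eq_true]
      exact ⟨rs[p], hmem, by simp [hprs]⟩
    refine ⟨ha, ?_⟩
    unfold pyKey
    cases hmin : PySem.List.min?
        ((o.2.filter (fun id => rs.contains id)).map
          (fun id => (((PySem.List.index? rs id).getD 0 : Nat) : Int))) (fun x => x) with
    | none => exact absurd ((PySem.List.min?_eq_none_iff _ _).mp hmin) (pv_keylist_ne_nil ha)
    | some m =>
      rw [Option.getD_some]
      have hm := PySem.List.min?_mem hmin
      rcases pv_mem_keylist.mp hm with ⟨id, hid, q, hq, rfl⟩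
      -- every matching id has first-occurrence index ≥ p
      have hge : p ≤ q := by
        by_contra hqlt
        exact hnone id hid (pv_mem_take_iff_index_lt.mpr ⟨q, hq, by omega⟩)
      -- rs[p] itself has first-occurrence index ≤ p
      have hs : (PySem.List.index? rs (rs[p])).isSome = true :=
        (PySem.List.index?_isSome_iff rs _).mpr hprs
      rcases Option.isSome_iff_exists.mp hs with ⟨q0, hq0⟩
      rcases PySem.List.getElem_of_index?_eq_some hq0 with ⟨hq0lt, _, hq0min⟩
      have hq0le : q0 ≤ p := by
        by_contra hgt
        exact hq0min p (by omega) rfl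
      have hle := PySem.List.min?_isMin hmin ((q0 : Int))
        (pv_mem_keylist.mpr ⟨rs[p], hmem, q0, hq0, rfl⟩)
      simp only at hle
      have : q = p := by omega
      rw [this]

theorem pv_pred_eq (rs : List String) (o : Int × List String) {p : Nat} (hp : p < rs.length) :
    (pyAnyMatch rs o && (pyKey rs o == (p : Int))) =
      (o.2.contains (rs.getD p "") && !(o.2.any (fun i => (rs.take p).contains i))) := by
  rw [List.getD_eq_getElem rs "" hp, Bool.eq_iff_iff]
  simp only [Bool.and_eq_true, beq_iff_eq, Bool.not_eq_true', List.any_eq_false]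
  rw [pv_key_eq_iff rs o hp]
  constructor
  · rintro ⟨h1, h2⟩
    exact ⟨by simpa using h1, fun i hi => by simpa using h2 i hi⟩
  · rintro ⟨h1, h2⟩
    exact ⟨by simpa using h1, fun i hi => by simpa using h2 i hi⟩

theorem pv_key_bounds (rs : List String) (o : Int × List String) (h : pyAnyMatch rs o = true) :
    0 ≤ pyKey rs o ∧ pyKey rs o < (rs.length : Int) := by
  unfold pyKey
  cases hmin : PySem.List.min?
      ((o.2.filter (fun id => rs.contains id)).map
        (fun id => (((PySem.List.index? rs id).getD 0 : Nat) : Int))) (fun x => x) with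
  | none => exact absurd ((PySem.List.min?_eq_none_iff _ _).mp hmin) (pv_keylist_ne_nil h)
  | some m =>
    have hm := PySem.List.min?_mem hmin
    rcases pv_mem_keylist.mp hm with ⟨id, _, q, hq, rfl⟩
    rcases PySem.List.getElem_of_index?_eq_some hq with ⟨hqlt, _, _⟩
    simp only [Option.getD_some]
    constructor
    · positivity
    · exact_mod_cast hqlt

theorem pv_enumerate_eq (rs : List String) :
    PySem.List.enumerate rs 0 = (List.range rs.length).map (fun (p : Nat) => ((p : Int), rs.getD p "")) := by
  apply List.ext_getElem
  · simp [PySem.List.length_enumerate]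
  · intro i h1 h2
    have hi : i < rs.length := by simpa [PySem.List.length_enumerate] using h1
    rw [PySem.List.getElem_enumerate]
    simp [List.getElem?_eq_getElem hi]

theorem pv_A_canon (cs : List (Int × List String)) (rs : List String) :
    get_expected_courses cs rs =
      (List.range rs.length).flatMap (fun (p : Nat) =>
        (cs.filter (fun o => pyAnyMatch rs o && (pyKey rs o == (p : Int)))).map (fun o => o.1)) := by
  unfold get_expected_courses
  show (PySem.List.sorted (cs.filter (fun o => pyAnyMatch rs o)) (pyKey rs) false).map (fun o => o.1) = _
  rw [pv_sorted_groups (pyKey rs) rs.length (cs.filter (fun o => pyAnyMatch rs o))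
        (fun a ha => pv_key_bounds rs a (List.of_mem_filter ha)),
      List.map_flatMap]
  refine List.flatMap_congr (fun p _ => ?_)
  rw [List.filter_filter]
  exact congrArg _ (List.filter_congr (fun a _ => Bool.and_comm _ _))

theorem pv_B_canon (cs : List (Int × List String)) (rs : List String) :
    get_expected_courses_alt cs rs =
      (List.range rs.length).flatMap (fun (p : Nat) =>
        (cs.filter (fun o =>
          o.2.contains (rs.getD p "") && !(o.2.any (fun i => (rs.take p).contains i)))).map (fun o => o.1)) := by
  unfold get_expected_courses_alt
  show (PySem.List.enumerate rs 0).foldl (fun result pr =>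
      cs.foldl (fun result o =>
        if o.2.contains pr.2 &&
            !(o.2.any (fun i => (PySem.List.slice rs none (some pr.1)).contains i))
        then result ++ [o.1] else result) result) [] = _
  rw [PySem.List.foldl_congr_mem _ _
        (fun (result : List Int) (pr : Int × String) =>
          result ++ (cs.filter (fun o =>
            o.2.contains pr.2 &&
              !(o.2.any (fun i => (PySem.List.slice rs none (some pr.1)).contains i)))).map
            (fun o => o.1)) _
        (fun acc pr _ => PySem.List.foldl_append_if _ _ cs acc),
      PySem.List.foldl_append_eq_flatMap, List.nil_append, pv_enumerate_eq, List.flatMap_map]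
  refine List.flatMap_congr (fun p hp => ?_)
  rw [PySem.List.slice_to_natCast]

-- ===== VERDICT (by name: the statement is the Claim_ definition above) =====
theorem get_expected_courses_spec : Claim_equal_get_expected_courses := by
  intro cs rs _ _
  unfold Spec_get_expected_courses
  rw [pv_A_canon, pv_B_canon]
  refine List.flatMap_congr (fun p hp => ?_)
  rw [List.filter_congr (fun o _ => pv_pred_eq rs o (List.mem_range.mp hp))]
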